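-- pv_equiv track=rewrite | github.com/mangei/adventofcode2016 | 13_2.py | is_wall
-- ===== SOURCE A (Python) =====
-- input_value = 1364
--
-- def is_wall(coordinate):
--     (x, y) = coordinate
--     value = x * x + 3 * x + 2 * x * y + y + y * y
--     value += input_value
--     binary = "{0:b}".format(value)
--     sum = 0
--     for b in binary:
--         if b == "1":
--             sum += 1
--     return sum % 2 != 0
-- ===== SOURCE B (Python) =====
-- input_value = 1364
--
-- def is_wall(coordinate):
--     (x, y) = coordinate
--     value = x * x + 3 * x + 2 * x * y + y + y * y + input_value
--     n = abs(value)
--     count = 0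
--     while n:
--         count += 1
--         n &= n - 1
--     return count % 2 != 0
-- ===== Notes on version B (the rewrite author's own statement) =====
-- stated objective: idiomatic
-- what changed: Replaces building a binary string and scanning its characters with Kernighan's set-bit loop (n &= n-1) on abs(value), counting one iteration per set bit.
import Mathlib
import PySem

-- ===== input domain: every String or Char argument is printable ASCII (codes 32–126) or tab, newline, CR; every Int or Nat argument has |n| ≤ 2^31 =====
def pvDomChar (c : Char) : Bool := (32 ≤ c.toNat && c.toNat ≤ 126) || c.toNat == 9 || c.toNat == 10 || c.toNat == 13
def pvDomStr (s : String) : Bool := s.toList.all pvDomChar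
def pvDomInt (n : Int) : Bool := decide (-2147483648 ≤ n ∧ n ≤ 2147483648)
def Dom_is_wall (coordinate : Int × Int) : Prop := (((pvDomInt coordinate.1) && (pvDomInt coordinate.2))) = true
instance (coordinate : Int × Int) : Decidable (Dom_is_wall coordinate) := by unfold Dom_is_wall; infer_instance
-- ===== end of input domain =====

-- B replaces A's binary-string build-and-scan with Kernighan's set-bit loop on abs(value); same return value, chosen for idiomatic bit counting (no speed claim).

-- ===== PORT A =====
-- "{0:b}".format on a nonzero natural: digits most-significant first
def toBinAux (n : Nat) : List Char :=
  if n = 0 then [] else toBinAux (n / 2) ++ [if n % 2 = 1 then '1' else '0']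

-- "{0:b}".format(v): optional '-' sign followed by the binary digits of |v| (exact for Python's format)
def pyBin (v : Int) : List Char :=
  if v < 0 then '-' :: toBinAux v.natAbs
  else if v = 0 then ['0'] else toBinAux v.natAbs

def is_wall (coordinate : Int × Int) : Bool :=
  let x := coordinate.1
  let y := coordinate.2
  let value := x * x + 3 * x + 2 * x * y + y + y * y + 1364
  let binary := pyBin value
  let sum : Int := binary.foldl (fun s b => if b = '1' then s + 1 else s) 0
  decide (sum % 2 ≠ 0)

-- ===== PORT B =====
-- Kernighan's loop: clear the lowest set bit until zero, counting iterations
def kern (n : Nat) : Nat :=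
  if h : n = 0 then 0 else 1 + kern (n &&& (n - 1))
decreasing_by
  have h1 : n &&& (n - 1) ≤ n - 1 := Nat.and_le_right
  omega

def is_wall_alt (coordinate : Int × Int) : Bool :=
  let x := coordinate.1
  let y := coordinate.2
  let value := x * x + 3 * x + 2 * x * y + y + y * y + 1364
  let count := kern value.natAbs
  decide (count % 2 ≠ 0)

-- ===== PRECONDITION & SPEC =====
def Spec_is_wall (coordinate : Int × Int) (out : Bool) : Prop := out = is_wall_alt coordinate
instance (coordinate : Int × Int) (out : Bool) : Decidable (Spec_is_wall coordinate out) := by unfold Spec_is_wall; infer_instance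

-- ===== CLAIM (what is proved, stated in full; the proofs are below) =====
def Claim_equal_is_wall : Prop := ∀ (coordinate : Int × Int), Dom_is_wall coordinate → Spec_is_wall coordinate (is_wall coordinate)

-- ===== LEMMAS AND PROOFS =====
-- reference bit-count by halving
def bitc (n : Nat) : Nat := if n = 0 then 0 else n % 2 + bitc (n / 2)

theorem bitc_ne (n : Nat) (h : n ≠ 0) : bitc n = n % 2 + bitc (n / 2) := by
  rw [bitc]; simp [h]

theorem kern_ne (n : Nat) (h : n ≠ 0) : kern n = 1 + kern (n &&& (n - 1)) := by
  rw [kern]; simp [h]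

theorem foldl_count_ones (l : List Char) (s : Int) :
    l.foldl (fun s b => if b = '1' then s + 1 else s) s = s + (l.count '1' : Nat) := by
  induction l generalizing s with
  | nil => simp
  | cons c t ih =>
    simp only [List.foldl, List.count_cons, ih]
    by_cases hc : c = '1' <;> simp [hc] <;> ring

theorem count_toBinAux (n : Nat) : (toBinAux n).count '1' = bitc n := by
  induction n using Nat.strong_induction_on with
  | _ n ih =>
    rw [toBinAux, bitc]
    by_cases h : n = 0
    · simp [h]
    · have hlt : n / 2 < n := Nat.div_lt_self (Nat.pos_of_ne_zero h) (by omega)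
      rw [if_neg h, if_neg h, List.count_append, ih _ hlt]
      rcases Nat.mod_two_eq_zero_or_one n with h2 | h2 <;> simp [h2] <;> omega


theorem count_pyBin (v : Int) : (pyBin v).count '1' = bitc v.natAbs := by
  rw [pyBin]
  by_cases h : v < 0
  · simp [h, count_toBinAux]
  · by_cases h0 : v = 0
    · simp [h0, bitc]
    · simp [h, h0, count_toBinAux]

theorem and_odd (m : Nat) : (2 * m + 1) &&& (2 * m) = 2 * m := by
  apply Nat.eq_of_testBit_eq
  intro i
  cases i with
  | zero => simp [Nat.testBit_zero, Nat.mul_mod_right]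
  | succ i =>
    rw [Nat.testBit_and]
    have h1 : (2 * m + 1) / 2 = m := by omega
    have h2 : 2 * m / 2 = m := by omega
    simp [Nat.testBit_succ, h1, h2]

theorem and_even (m : Nat) : (2 * m) &&& (2 * m - 1) = 2 * (m &&& (m - 1)) := by
  apply Nat.eq_of_testBit_eq
  intro i
  cases i with
  | zero =>
    rw [Nat.testBit_and]
    simp [Nat.testBit_zero, Nat.mul_mod_right]
  | succ i =>
    rw [Nat.testBit_and]
    have h1 : 2 * m / 2 = m := by omega
    have h2 : (2 * m - 1) / 2 = m - 1 := by omega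
    have h3 : 2 * (m &&& (m - 1)) / 2 = m &&& (m - 1) := by omega
    simp [Nat.testBit_succ, h1, h2, h3, Nat.testBit_and]

theorem kern_two_mul (m : Nat) : kern (2 * m) = kern m := by
  induction m using Nat.strong_induction_on with
  | _ m ih =>
    by_cases h : m = 0
    · simp [h]
    · have h2 : 2 * m ≠ 0 := by omega
      have hlt : m &&& (m - 1) < m := by
        have := Nat.and_le_right (n := m) (m := m - 1); omega
      rw [kern_ne (2 * m) h2, and_even m, ih _ hlt, kern_ne m h]

theorem kern_eq_bitc (n : Nat) : kern n = bitc n := by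
  induction n using Nat.strong_induction_on with
  | _ n ih =>
    by_cases h : n = 0
    · simp [h, kern, bitc]
    · have hdiv : n / 2 < n := Nat.div_lt_self (Nat.pos_of_ne_zero h) (by omega)
      rcases Nat.mod_two_eq_zero_or_one n with h2 | h2
      · -- n even
        have hm : n = 2 * (n / 2) := by omega
        have hk := kern_two_mul (n / 2)
        rw [← hm] at hk
        rw [hk, ih _ hdiv, bitc_ne n h, h2, Nat.zero_add]
      · -- n odd
        have hand : n &&& (n - 1) = 2 * (n / 2) := by
          have hm : n = 2 * (n / 2) + 1 := by omega
          conv_lhs => rw [hm]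
          have he : 2 * (n / 2) + 1 - 1 = 2 * (n / 2) := by omega
          rw [he]
          exact and_odd _
        rw [kern_ne n h, hand, kern_two_mul, ih _ hdiv, bitc_ne n h, h2]

-- ===== VERDICT (by name: the statement is the Claim_ definition above) =====
theorem is_wall_spec : Claim_equal_is_wall := by
  intro ⟨x, y⟩ _
  unfold Spec_is_wall is_wall is_wall_alt
  simp only [foldl_count_ones, count_pyBin, kern_eq_bitc, decide_eq_decide]
  omega
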